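-- pv_equiv track=rewrite | github.com/Ali-the-Special/NAST | scripts/construct_evaluation_benchmark.py | parse_options_only
-- ===== SOURCE A (Python) =====
-- def parse_options_only(text):
--     lines = text.split('\n')
--     options = {"A": "", "B": "", "C": "", "D": ""}
--
--     for line in lines:
--         line = line.strip()
--         if line.startswith("A)") or line.startswith("A."):
--             options["A"] = line[2:].strip()
--         elif line.startswith("B)") or line.startswith("B."):
--             options["B"] = line[2:].strip()
--         elif line.startswith("C)") or line.startswith("C."):
--             options["C"] = line[2:].strip()
--         elif line.startswith("D)") or line.startswith("D."):
--             options["D"] = line[2:].strip()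
--
--     return options
-- ===== SOURCE B (Python) =====
-- def parse_options_only(text):
--     lines = [line.strip() for line in text.split('\n')]
--     result = {}
--     for letter in "ABCD":
--         value = ""
--         for line in reversed(lines):
--             if line.startswith(letter + ')') or line.startswith(letter + '.'):
--                 value = line[2:].strip()
--                 break
--         result[letter] = value
--     return result
-- ===== Notes on version B (the rewrite author's own statement) =====
-- stated objective: alternative
-- what changed: Instead of one forward pass mutating a four-key dict through an if/elif ladder, B strips all lines once and then, per letter A-D, scans the reversed line list for the first matching line (last match wins), building the result dict fresh.
import Mathlib
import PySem

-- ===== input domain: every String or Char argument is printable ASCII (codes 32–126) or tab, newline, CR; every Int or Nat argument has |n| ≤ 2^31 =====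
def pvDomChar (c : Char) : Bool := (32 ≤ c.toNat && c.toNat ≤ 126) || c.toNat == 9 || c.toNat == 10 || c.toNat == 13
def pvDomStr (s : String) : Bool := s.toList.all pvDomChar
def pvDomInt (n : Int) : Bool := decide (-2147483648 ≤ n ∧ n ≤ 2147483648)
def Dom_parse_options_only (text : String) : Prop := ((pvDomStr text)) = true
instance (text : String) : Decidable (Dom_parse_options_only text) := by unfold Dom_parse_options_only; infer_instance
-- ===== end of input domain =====

-- B replaces A's single forward pass with an if/elif ladder over a mutable dict by a per-letter
-- backward search (first match in the reversed stripped lines = last match), same cost.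

-- ===== PORT A =====
def poA_step (opts : PySem.Dict String String) (line0 : String) : PySem.Dict String String :=
  let line := PySem.Str.strip line0
  if PySem.Str.startswith line "A)" || PySem.Str.startswith line "A." then
    opts.insert "A" (PySem.Str.strip (PySem.Str.slice line (some 2) none))
  else if PySem.Str.startswith line "B)" || PySem.Str.startswith line "B." then
    opts.insert "B" (PySem.Str.strip (PySem.Str.slice line (some 2) none))
  else if PySem.Str.startswith line "C)" || PySem.Str.startswith line "C." then
    opts.insert "C" (PySem.Str.strip (PySem.Str.slice line (some 2) none))
  else if PySem.Str.startswith line "D)" || PySem.Str.startswith line "D." then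
    opts.insert "D" (PySem.Str.strip (PySem.Str.slice line (some 2) none))
  else opts

def parse_options_only (text : String) : List (String × String) :=
  let lines := (PySem.Str.split? text "\n").getD []
  (lines.foldl poA_step
    (PySem.Dict.ofList [("A", ""), ("B", ""), ("C", ""), ("D", "")])).items

-- ===== PORT B =====
-- the inner 'for line in reversed(lines): … break' is the first match in the reversed list
def poB_match? (L : Char) (line : String) : Option String :=
  if PySem.Str.startswith line (String.ofList [L, ')']) ||
     PySem.Str.startswith line (String.ofList [L, '.']) then
    some (PySem.Str.strip (PySem.Str.slice line (some 2) none))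
  else none

def parse_options_only_alt (text : String) : List (String × String) :=
  let lines := ((PySem.Str.split? text "\n").getD []).map PySem.Str.strip
  ['A', 'B', 'C', 'D'].map (fun L =>
    (String.ofList [L], (lines.reverse.findSome? (poB_match? L)).getD ""))

-- ===== PRECONDITION & SPEC =====
def Spec_parse_options_only (text : String) (out : List (String × String)) : Prop := out = parse_options_only_alt text
instance (text : String) (out : List (String × String)) : Decidable (Spec_parse_options_only text out) := by unfold Spec_parse_options_only; infer_instance

-- ===== CLAIM =====
def Claim_equal_parse_options_only : Prop := ∀ (text : String), Dom_parse_options_only text → Spec_parse_options_only text (parse_options_only text)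

-- ===== LEMMAS AND PROOFS =====

theorem poA_step_eq (a b c d : String) (l : String) :
    poA_step (PySem.Dict.mk [("A", a), ("B", b), ("C", c), ("D", d)]) l =
      PySem.Dict.mk [("A", (poB_match? 'A' (PySem.Str.strip l)).getD a),
                     ("B", (poB_match? 'B' (PySem.Str.strip l)).getD b),
                     ("C", (poB_match? 'C' (PySem.Str.strip l)).getD c),
                     ("D", (poB_match? 'D' (PySem.Str.strip l)).getD d)] := by
  unfold poA_step poB_match?
  generalize PySem.Str.strip l = s
  rcases hcs : s.toList with _ | ⟨c0, _ | ⟨c1, r⟩⟩ <;>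
    simp only [PySem.Str.startswith_eq, hcs]
  · simp [PySem.Chars.startswith]
  · simp [PySem.Chars.startswith]
  · simp only [PySem.Chars.startswith]
    by_cases e1 : c1 = ')' <;> by_cases e2 : c1 = '.' <;>
      by_cases d1 : c0 = 'A' <;> by_cases d2 : c0 = 'B' <;>
      by_cases d3 : c0 = 'C' <;> by_cases d4 : c0 = 'D' <;>
      simp_all [PySem.Dict.insert, PySem.Dict.contains,
        (by decide : String.ofList ['A', ')'] = "A)"),
        (by decide : String.ofList ['A', '.'] = "A."),
        (by decide : String.ofList ['B', ')'] = "B)"),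
        (by decide : String.ofList ['B', '.'] = "B."),
        (by decide : String.ofList ['C', ')'] = "C)"),
        (by decide : String.ofList ['C', '.'] = "C."),
        (by decide : String.ofList ['D', ')'] = "D)"),
        (by decide : String.ofList ['D', '.'] = "D.")] <;>
      (try split_ifs <;> simp_all [eq_comm])

theorem foldA_items (ls : List String) : ∀ (a b c d : String),
    (ls.foldl poA_step (PySem.Dict.mk [("A", a), ("B", b), ("C", c), ("D", d)])).items =
      [("A", ls.foldl (fun v l => (poB_match? 'A' (PySem.Str.strip l)).getD v) a),
       ("B", ls.foldl (fun v l => (poB_match? 'B' (PySem.Str.strip l)).getD v) b),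
       ("C", ls.foldl (fun v l => (poB_match? 'C' (PySem.Str.strip l)).getD v) c),
       ("D", ls.foldl (fun v l => (poB_match? 'D' (PySem.Str.strip l)).getD v) d)] := by
  induction ls with
  | nil => intro a b c d; rfl
  | cons l ls ih =>
    intro a b c d
    simp only [List.foldl_cons, poA_step_eq]
    exact ih _ _ _ _

theorem foldl_getD_eq_rev_findSome? (m : String → Option String) (ls : List String) :
    ∀ (a : String),
    ls.foldl (fun v l => (m l).getD v) a = (ls.reverse.findSome? m).getD a := by
  induction ls with
  | nil => intro a; rfl
  | cons l ls ih =>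
    intro a
    simp only [List.foldl_cons, List.reverse_cons, List.findSome?_append, ih]
    cases h : ls.reverse.findSome? m <;> cases hm : m l <;>
      simp_all [List.findSome?]

-- ===== VERDICT =====
theorem parse_options_only_spec : Claim_equal_parse_options_only := by
  intro text _
  unfold Spec_parse_options_only parse_options_only parse_options_only_alt
  have hof : PySem.Dict.ofList [("A", ""), ("B", ""), ("C", ""), ("D", "")] =
      PySem.Dict.mk [("A", ""), ("B", ""), ("C", ""), ("D", "")] := by decide
  rw [hof, foldA_items]
  generalize (PySem.Str.split? text "\n").getD [] = ls
  simp only [foldl_getD_eq_rev_findSome?, ← List.map_reverse, List.findSome?_map,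
    List.map_cons, List.map_nil, Function.comp_def]
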